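-- pv_equiv track=rewrite | github.com/luisbernardinello/computer-oriented-numerical-methods | nm-calculator/app.py | criterio_colunas
-- ===== SOURCE A (Python) =====
-- def criterio_colunas(B):
--     valor_max = -1
--     for i in range(len(B)):
--         aux = 0
--         for j in range(len(B)):
--             if i != j:
--                 aux += abs(B[j][i])
--         if aux > valor_max:
--             valor_max = aux
--     return valor_max < 1
-- ===== SOURCE B (Python) =====
-- def criterio_colunas(B):
--     n = len(B)
--     sums = [0] * n
--     for i, row in enumerate(B):
--         for j in range(n):
--             if i != j:
--                 sums[j] += abs(row[j])
--     return all(s < 1 for s in sums)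
-- ===== Notes on version B (the rewrite author's own statement) =====
-- stated objective: alternative
-- what changed: Replaces A's per-column recomputation with a running max by a single row-major pass scattering |row[j]| into a per-column accumulator array, finishing with all(s < 1).
import Mathlib
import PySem

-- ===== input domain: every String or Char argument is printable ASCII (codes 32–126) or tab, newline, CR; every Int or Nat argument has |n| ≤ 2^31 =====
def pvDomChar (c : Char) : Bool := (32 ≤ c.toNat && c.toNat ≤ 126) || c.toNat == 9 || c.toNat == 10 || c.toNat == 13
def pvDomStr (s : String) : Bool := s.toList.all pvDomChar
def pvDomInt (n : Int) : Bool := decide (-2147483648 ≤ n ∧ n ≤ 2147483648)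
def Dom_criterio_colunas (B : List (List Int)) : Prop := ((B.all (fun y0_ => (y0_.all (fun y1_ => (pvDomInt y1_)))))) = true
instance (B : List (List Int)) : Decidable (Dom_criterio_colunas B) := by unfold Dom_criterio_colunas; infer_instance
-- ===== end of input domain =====

-- B replaces A's per-column recomputation + running max by one row-major pass that scatters
-- |row[j]| into a per-column accumulator array and then checks all(s < 1): same cost, different decomposition.

-- ===== PORT A =====
def criterio_colunas (B : List (List Int)) : Bool :=
  let valor_max : Int :=
    (PySem.List.pyRange 0 (PySem.List.len B) 1).foldl
      (fun valor_max i =>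
        let aux : Int :=
          (PySem.List.pyRange 0 (PySem.List.len B) 1).foldl
            (fun aux j =>
              if i ≠ j then aux + |PySem.List.pyGetD (PySem.List.pyGetD B j []) i 0| else aux)
            0
        if aux > valor_max then aux else valor_max)
      (-1)
  decide (valor_max < 1)

-- ===== PORT B =====
def criterio_colunas_alt (B : List (List Int)) : Bool :=
  let n : Int := PySem.List.len B
  let sums : List Int :=
    (PySem.List.enumerate B).foldl
      (fun sums p =>
        (PySem.List.pyRange 0 n 1).foldl
          (fun s j =>
            if p.1 ≠ j then
              PySem.List.pySetD s j (PySem.List.pyGetD s j 0 + |PySem.List.pyGetD p.2 j 0|)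
            else s)
          sums)
      (List.replicate B.length 0)
  sums.all (fun s => decide (s < 1))

-- ===== PRECONDITION & SPEC =====
-- Pre_ excludes exactly the ragged matrices on which A raises IndexError (it reads B[j][i] for all i ≠ j below len(B)).
def Pre_criterio_colunas (B : List (List Int)) : Prop :=
  ∀ j < B.length, ∀ i < B.length, i ≠ j → i < (B.getD j []).length
instance (B : List (List Int)) : Decidable (Pre_criterio_colunas B) := by
  unfold Pre_criterio_colunas; infer_instance
def pvWitness_criterio_colunas : List (List Int) := [[5, 0], [0, 5]]

def Spec_criterio_colunas (B : List (List Int)) (out : Bool) : Prop := out = criterio_colunas_alt B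
instance (B : List (List Int)) (out : Bool) : Decidable (Spec_criterio_colunas B out) := by unfold Spec_criterio_colunas; infer_instance

-- ===== CLAIM (what is proved, stated in full; the proofs are below) =====
def Claim_equal_criterio_colunas : Prop := ∀ (B : List (List Int)), Dom_criterio_colunas B → Pre_criterio_colunas B → Spec_criterio_colunas B (criterio_colunas B)


-- ===== LEMMAS AND PROOFS =====

-- A's per-column sum: over j, |B[j][i]| for j ≠ i.
def pvColA (B : List (List Int)) (i : Int) : Int :=
  ((PySem.List.pyRange 0 ((B.length : Int)) 1).map
    (fun j => if i ≠ j then |PySem.List.pyGetD (PySem.List.pyGetD B j []) i 0| else 0)).sum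

lemma pv_maxfold_lt (f : Int → Int) (l : List Int) : ∀ v : Int,
    (List.foldl (fun vm i => if f i > vm then f i else vm) v l < 1) ↔
      (v < 1 ∧ ∀ i ∈ l, f i < 1) := by
  induction l with
  | nil => simp
  | cons a t ih =>
    intro v
    simp only [List.foldl_cons, List.mem_cons, ih]
    split_ifs with h
    · constructor
      · rintro ⟨h1, h2⟩
        refine ⟨by omega, fun i hi => ?_⟩
        rcases hi with rfl | hi
        · exact h1
        · exact h2 i hi
      · rintro ⟨h1, h2⟩
        exact ⟨h2 a (Or.inl rfl), fun i hi => h2 i (Or.inr hi)⟩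
    · constructor
      · rintro ⟨h1, h2⟩
        refine ⟨h1, fun i hi => ?_⟩
        rcases hi with rfl | hi
        · omega
        · exact h2 i hi
      · rintro ⟨h1, h2⟩
        exact ⟨h1, fun i hi => h2 i (Or.inr hi)⟩

lemma pv_A_eq (B : List (List Int)) :
    criterio_colunas B = decide (∀ k : Nat, k < B.length → pvColA B (k : Int) < 1) := by
  simp only [criterio_colunas, PySem.List.len_eq]
  have hout : ∀ (acc : Int), ∀ i ∈ PySem.List.pyRange 0 ((B.length : Int)) 1,
      (fun (valor_max i : Int) =>
        let aux : Int :=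
          (PySem.List.pyRange 0 ((B.length : Int)) 1).foldl
            (fun aux j =>
              if i ≠ j then aux + |PySem.List.pyGetD (PySem.List.pyGetD B j []) i 0| else aux) 0
        if aux > valor_max then aux else valor_max) acc i
      = (fun (valor_max i : Int) =>
          if pvColA B i > valor_max then pvColA B i else valor_max) acc i := by
    intro acc i _
    have hin : (PySem.List.pyRange 0 ((B.length : Int)) 1).foldl
        (fun aux j =>
          if i ≠ j then aux + |PySem.List.pyGetD (PySem.List.pyGetD B j []) i 0| else aux) 0
        = pvColA B i := by
      rw [PySem.List.foldl_congr_mem _ _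
        (fun aux j => aux + if i ≠ j then |PySem.List.pyGetD (PySem.List.pyGetD B j []) i 0| else 0) _
        (by intro acc' j _; by_cases hij : i = j <;> simp [hij])]
      rw [PySem.List.foldl_add]
      simp [pvColA]
    simp only [hin]
  rw [PySem.List.foldl_congr_mem _ _ _ _ hout]
  apply decide_eq_decide.mpr
  rw [pv_maxfold_lt (pvColA B) (PySem.List.pyRange 0 ((B.length : Int)) 1) (-1)]
  constructor
  · rintro ⟨-, h⟩ k hk
    exact h (k : Int) (PySem.List.mem_pyRange_one.mpr ⟨by omega, by exact_mod_cast hk⟩)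
  · intro h
    refine ⟨by omega, fun i hi => ?_⟩
    rcases PySem.List.mem_pyRange_one.mp hi with ⟨h0, h1⟩
    lift i to Nat using h0
    exact h i (by exact_mod_cast h1)

-- B's inner loop (row scatter) preserves the length of the accumulator list.
lemma pv_inner_len (i : Int) (row : List Int) : ∀ (m : Nat) (s : List Int),
    ((PySem.List.pyRange 0 ((m : Nat) : Int) 1).foldl
      (fun s j =>
        if i ≠ j then
          PySem.List.pySetD s j (PySem.List.pyGetD s j 0 + |PySem.List.pyGetD row j 0|)
        else s) s).length = s.length := by
  intro m
  induction m with
  | zero => intro s; simp [PySem.List.pyRange_one_eq_nil]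
  | succ m ih =>
    intro s
    rw [show (((m + 1 : Nat)) : Int) = ((m : Nat) : Int) + 1 by push_cast; ring]
    rw [PySem.List.pyRange_one_succ_right (by omega), List.foldl_append]
    simp only [List.foldl_cons, List.foldl_nil]
    split_ifs with h
    · rw [PySem.List.pySetD_natCast, List.length_set, ih]
    · exact ih s

-- Effect of B's inner loop on one accumulator cell.
lemma pv_inner_getD (i : Int) (row : List Int) : ∀ (m : Nat) (s : List Int), m ≤ s.length →
    ∀ (k : Nat), k < s.length →
    PySem.List.pyGetD
      ((PySem.List.pyRange 0 ((m : Nat) : Int) 1).foldl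
        (fun s j =>
          if i ≠ j then
            PySem.List.pySetD s j (PySem.List.pyGetD s j 0 + |PySem.List.pyGetD row j 0|)
          else s) s) (k : Int) 0
      = PySem.List.pyGetD s (k : Int) 0 +
          (if k < m ∧ i ≠ (k : Int) then |PySem.List.pyGetD row (k : Int) 0| else 0) := by
  intro m
  induction m with
  | zero =>
    intro s _ k _
    simp [PySem.List.pyRange_one_eq_nil]
  | succ m ih =>
    intro s hm k hk
    rw [show (((m + 1 : Nat)) : Int) = ((m : Nat) : Int) + 1 by push_cast; ring]
    rw [PySem.List.pyRange_one_succ_right (by omega), List.foldl_append]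
    simp only [List.foldl_cons, List.foldl_nil]
    by_cases h : i ≠ ((m : Nat) : Int)
    · -- i ≠ m : the last step writes cell m
      rw [if_pos h, PySem.List.pyGetD_pySetD_natCast _ m k _ _ (by rw [pv_inner_len]; omega)]
      by_cases hkm : k = m
      · subst hkm
        rw [if_pos rfl, ih s (by omega) k (by omega),
          if_neg (show ¬(k < k ∧ i ≠ (k : Int)) by simp),
          if_pos (show k < k + 1 ∧ i ≠ (k : Int) from ⟨by omega, h⟩)]
        ring
      · rw [if_neg hkm, ih s (by omega) k hk]
        have hiff : (k < m ∧ i ≠ (k : Int)) ↔ (k < m + 1 ∧ i ≠ (k : Int)) := by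
          constructor <;> rintro ⟨h1, h2⟩ <;> exact ⟨by omega, h2⟩
        rw [if_congr hiff rfl rfl]
    · -- i = m : the last step is skipped
      rw [if_neg h, ih s (by omega) k hk]
      rw [not_not] at h
      have hiff : (k < m ∧ i ≠ (k : Int)) ↔ (k < m + 1 ∧ i ≠ (k : Int)) := by
        constructor
        · rintro ⟨h1, h2⟩
          exact ⟨by omega, h2⟩
        · rintro ⟨h1, h2⟩
          refine ⟨?_, h2⟩
          have hne : k ≠ m := by rintro rfl; exact h2 h
          omega
      rw [if_congr hiff rfl rfl]

-- B's outer loop preserves the length of the accumulator list.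
lemma pv_outer_len (m : Nat) : ∀ (ps : List (Int × List Int)) (s : List Int),
    (ps.foldl (fun sums p =>
      (PySem.List.pyRange 0 ((m : Nat) : Int) 1).foldl
        (fun s j =>
          if p.1 ≠ j then
            PySem.List.pySetD s j (PySem.List.pyGetD s j 0 + |PySem.List.pyGetD p.2 j 0|)
          else s) sums) s).length = s.length := by
  intro ps
  induction ps with
  | nil => intro s; simp
  | cons p t ih =>
    intro s
    simp only [List.foldl_cons]
    rw [ih, pv_inner_len]

-- Effect of B's whole pass on one accumulator cell: column k summed row by row.
lemma pv_outer_getD (m : Nat) : ∀ (ps : List (Int × List Int)) (s : List Int), m ≤ s.length →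
    ∀ (k : Nat), k < s.length →
    PySem.List.pyGetD
      (ps.foldl (fun sums p =>
        (PySem.List.pyRange 0 ((m : Nat) : Int) 1).foldl
          (fun s j =>
            if p.1 ≠ j then
              PySem.List.pySetD s j (PySem.List.pyGetD s j 0 + |PySem.List.pyGetD p.2 j 0|)
            else s) sums) s) (k : Int) 0
      = PySem.List.pyGetD s (k : Int) 0 +
          (ps.map (fun p =>
            if k < m ∧ p.1 ≠ (k : Int) then |PySem.List.pyGetD p.2 (k : Int) 0| else 0)).sum := by
  intro ps
  induction ps with
  | nil => intro s _ k _; simp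
  | cons p t ih =>
    intro s hm k hk
    simp only [List.foldl_cons, List.map_cons, List.sum_cons]
    rw [ih _ (by rw [pv_inner_len]; omega) k (by rw [pv_inner_len]; omega)]
    rw [pv_inner_getD p.1 p.2 m s hm k hk]
    ring

lemma pv_B_eq (B : List (List Int)) :
    criterio_colunas_alt B = decide (∀ k : Nat, k < B.length → pvColA B (k : Int) < 1) := by
  simp only [criterio_colunas_alt, PySem.List.len_eq]
  have hlen : ((PySem.List.enumerate B).foldl (fun sums p =>
      (PySem.List.pyRange 0 ((B.length : Nat) : Int) 1).foldl
        (fun s j =>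
          if p.1 ≠ j then
            PySem.List.pySetD s j (PySem.List.pyGetD s j 0 + |PySem.List.pyGetD p.2 j 0|)
          else s) sums) (List.replicate B.length 0)).length = B.length := by
    rw [pv_outer_len, List.length_replicate]
  have hget : ∀ k : Nat, k < B.length →
      PySem.List.pyGetD ((PySem.List.enumerate B).foldl (fun sums p =>
        (PySem.List.pyRange 0 ((B.length : Nat) : Int) 1).foldl
          (fun s j =>
            if p.1 ≠ j then
              PySem.List.pySetD s j (PySem.List.pyGetD s j 0 + |PySem.List.pyGetD p.2 j 0|)
            else s) sums) (List.replicate B.length 0)) (k : Int) 0 = pvColA B (k : Int) := by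
    intro k hk
    rw [pv_outer_getD B.length (PySem.List.enumerate B) (List.replicate B.length 0)
      (by simp) k (by simpa using hk)]
    rw [PySem.List.enumerate_eq_map_pyRange B [], PySem.List.len_eq, List.map_map]
    have hmc : ∀ j ∈ PySem.List.pyRange 0 ((B.length : Int)) 1,
        ((fun p => if k < B.length ∧ p.1 ≠ (k : Int)
            then |PySem.List.pyGetD p.2 (k : Int) 0| else 0) ∘
          (fun j => (j, PySem.List.pyGetD B j []))) j
        = (fun j => if (k : Int) ≠ j
            then |PySem.List.pyGetD (PySem.List.pyGetD B j []) (k : Int) 0| else 0) j := by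
      intro j _
      simp only [Function.comp]
      by_cases hj : (k : Int) = j
      · rw [if_neg (by simp [hj]), if_neg (by simp [hj])]
      · rw [if_pos ⟨hk, fun e => hj e.symm⟩, if_pos hj]
    rw [List.map_congr_left hmc]
    simp [pvColA]
  apply Bool.eq_iff_iff.mpr
  rw [List.all_eq_true, decide_eq_true_eq]
  constructor
  · intro h k hk
    have hx := h _ (List.getElem_mem (by omega :
      k < ((PySem.List.enumerate B).foldl (fun sums p =>
        (PySem.List.pyRange 0 ((B.length : Nat) : Int) 1).foldl
          (fun s j =>
            if p.1 ≠ j then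
              PySem.List.pySetD s j (PySem.List.pyGetD s j 0 + |PySem.List.pyGetD p.2 j 0|)
            else s) sums) (List.replicate B.length 0)).length))
    rw [decide_eq_true_eq] at hx
    rw [← hget k hk, PySem.List.pyGetD_natCast, List.getD_eq_getElem _ _ (by omega)]
    exact hx
  · intro h x hx
    obtain ⟨n, hn, rfl⟩ := List.mem_iff_getElem.mp hx
    rw [decide_eq_true_eq]
    have hn' : n < B.length := by omega
    have := h n hn'
    rw [← hget n hn', PySem.List.pyGetD_natCast, List.getD_eq_getElem _ _ hn] at this
    exact this

-- ===== VERDICT (by name: the statement is the Claim_ definition above) =====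
theorem criterio_colunas_spec : Claim_equal_criterio_colunas := by
  intro B _ _
  unfold Spec_criterio_colunas
  rw [pv_A_eq, pv_B_eq]
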